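-- pv_equiv track=rewrite | github.com/Ash2Zap/soulful-chakra-Full_Report. | app.py | build_quick_reading
-- ===== SOURCE A (Python) =====
-- def build_quick_reading(chakras: dict) -> str:
--     """Builds a more detailed 'Quick Reading' paragraph based on which chakras are weak/blocked."""
--     blocked_parts = []
--     weak_parts = []
--     overactive_parts = []
--
--     for ch, info in chakras.items():
--         stt = info["status"]
--         if stt == "Blocked / Underactive":
--             blocked_parts.append(ch)
--         elif stt == "Slightly Weak":
--             weak_parts.append(ch)
--         elif stt == "Overactive / Dominant":
--             overactive_parts.append(ch)
--
--     lines = []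
--     if not blocked_parts and not weak_parts and not overactive_parts:
--         return "All 7 chakras are currently flowing well. Maintain your present rituals, keep your emotions clean, and continue crystal support weekly."
--
--     if blocked_parts:
--         lines.append(
--             "The following chakras are showing energy blocks or past emotional residue: "
--             + ", ".join(blocked_parts)
--             + ". This usually happens when we carry old stories, fear, or unprocessed pain in those areas."
--         )
--     if weak_parts:
--         lines.append(
--             "These chakras are a little under-energized or not used enough: "
--             + ", ".join(weak_parts)
--             + ". Activate them with daily movement, color therapy and breathwork."
--         )
--     if overactive_parts:
--         lines.append(
--             "These chakras are working too hard or compensating for another area: "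
--             + ", ".join(overactive_parts)
--             + ". Soften them with grounding, slow breathing and better boundaries."
--         )
--
--     lines.append(
--         "Start with the root or the lowest blocked chakra first, then move upwards. Use the crystal suggestions given in this report and pair it with 108x Ho'oponopono on the main person/event connected to that chakra."
--     )
--     return " ".join(lines)
-- ===== SOURCE B (Python) =====
-- def build_quick_reading(chakras: dict) -> str:
--     """Builds a more detailed 'Quick Reading' paragraph based on which chakras are weak/blocked."""
--     table = [
--         ("Blocked / Underactive",
--          "The following chakras are showing energy blocks or past emotional residue: ",
--          ". This usually happens when we carry old stories, fear, or unprocessed pain in those areas."),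
--         ("Slightly Weak",
--          "These chakras are a little under-energized or not used enough: ",
--          ". Activate them with daily movement, color therapy and breathwork."),
--         ("Overactive / Dominant",
--          "These chakras are working too hard or compensating for another area: ",
--          ". Soften them with grounding, slow breathing and better boundaries."),
--     ]
--     lines = []
--     for status, intro, advice in table:
--         names = [ch for ch, info in chakras.items() if info["status"] == status]
--         if names:
--             lines.append(intro + ", ".join(names) + advice)
--     if not lines:
--         return "All 7 chakras are currently flowing well. Maintain your present rituals, keep your emotions clean, and continue crystal support weekly."
--     lines.append(
--         "Start with the root or the lowest blocked chakra first, then move upwards. Use the crystal suggestions given in this report and pair it with 108x Ho'oponopono on the main person/event connected to that chakra."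
--     )
--     return " ".join(lines)
-- ===== Notes on version B (the rewrite author's own statement) =====
-- stated objective: simpler
-- what changed: Replaces the one-pass three-accumulator classification plus three separate if-blocks with a data-driven (status, intro, advice) table: one uniform loop filters the names per category and templates the line, eliminating the three parallel lists and the repeated line-building code.
import Mathlib
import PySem

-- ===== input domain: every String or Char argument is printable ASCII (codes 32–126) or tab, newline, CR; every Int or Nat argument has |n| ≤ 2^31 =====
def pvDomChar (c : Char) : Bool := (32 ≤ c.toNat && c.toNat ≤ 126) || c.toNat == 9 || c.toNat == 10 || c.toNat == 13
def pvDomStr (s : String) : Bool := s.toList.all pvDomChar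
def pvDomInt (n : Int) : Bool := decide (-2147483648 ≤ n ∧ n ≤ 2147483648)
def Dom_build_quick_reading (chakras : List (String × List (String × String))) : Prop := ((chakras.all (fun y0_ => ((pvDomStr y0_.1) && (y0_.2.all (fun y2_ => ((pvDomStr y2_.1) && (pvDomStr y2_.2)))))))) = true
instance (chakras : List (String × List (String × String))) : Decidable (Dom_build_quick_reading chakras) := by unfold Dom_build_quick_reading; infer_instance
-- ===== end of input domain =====

-- B replaces the one-pass three-accumulator classification and three copied if-blocks
-- with a data-driven (status, intro, advice) table and one uniform filter-and-template loop (objective: simpler).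

-- info["status"] with first-match lookup (under Pre_ the key is always present)
def pvStatus (info : List (String × String)) : String := (List.lookup "status" info).getD ""

-- ===== PORT A =====
def pvClassify (chakras : List (String × List (String × String))) :
    List String × List String × List String :=
  chakras.foldl (fun acc p =>
    let stt := pvStatus p.2
    if stt == "Blocked / Underactive" then (acc.1 ++ [p.1], acc.2.1, acc.2.2)
    else if stt == "Slightly Weak" then (acc.1, acc.2.1 ++ [p.1], acc.2.2)
    else if stt == "Overactive / Dominant" then (acc.1, acc.2.1, acc.2.2 ++ [p.1])
    else acc) ([], [], [])

def build_quick_reading (chakras : List (String × List (String × String))) : String :=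
  let bwo := pvClassify chakras
  let blocked_parts := bwo.1
  let weak_parts := bwo.2.1
  let overactive_parts := bwo.2.2
  if blocked_parts.isEmpty && weak_parts.isEmpty && overactive_parts.isEmpty then
    "All 7 chakras are currently flowing well. Maintain your present rituals, keep your emotions clean, and continue crystal support weekly."
  else
    let lines : List String := []
    let lines := if blocked_parts.isEmpty then lines else
      lines ++ ["The following chakras are showing energy blocks or past emotional residue: "
        ++ PySem.Str.join ", " blocked_parts
        ++ ". This usually happens when we carry old stories, fear, or unprocessed pain in those areas."]
    let lines := if weak_parts.isEmpty then lines else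
      lines ++ ["These chakras are a little under-energized or not used enough: "
        ++ PySem.Str.join ", " weak_parts
        ++ ". Activate them with daily movement, color therapy and breathwork."]
    let lines := if overactive_parts.isEmpty then lines else
      lines ++ ["These chakras are working too hard or compensating for another area: "
        ++ PySem.Str.join ", " overactive_parts
        ++ ". Soften them with grounding, slow breathing and better boundaries."]
    let lines := lines ++ ["Start with the root or the lowest blocked chakra first, then move upwards. Use the crystal suggestions given in this report and pair it with 108x Ho'oponopono on the main person/event connected to that chakra."]
    PySem.Str.join " " lines

-- ===== PORT B =====
def pvTable : List (String × String × String) :=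
  [("Blocked / Underactive",
    "The following chakras are showing energy blocks or past emotional residue: ",
    ". This usually happens when we carry old stories, fear, or unprocessed pain in those areas."),
   ("Slightly Weak",
    "These chakras are a little under-energized or not used enough: ",
    ". Activate them with daily movement, color therapy and breathwork."),
   ("Overactive / Dominant",
    "These chakras are working too hard or compensating for another area: ",
    ". Soften them with grounding, slow breathing and better boundaries.")]

def build_quick_reading_alt (chakras : List (String × List (String × String))) : String :=
  let lines := pvTable.foldl (fun ls t =>
    let names := (chakras.filter (fun p => pvStatus p.2 == t.1)).map Prod.fst
    if names.isEmpty then ls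
    else ls ++ [t.2.1 ++ PySem.Str.join ", " names ++ t.2.2]) []
  if lines.isEmpty then
    "All 7 chakras are currently flowing well. Maintain your present rituals, keep your emotions clean, and continue crystal support weekly."
  else
    PySem.Str.join " " (lines ++ ["Start with the root or the lowest blocked chakra first, then move upwards. Use the crystal suggestions given in this report and pair it with 108x Ho'oponopono on the main person/event connected to that chakra."])

-- ===== PRECONDITION & SPEC =====
-- Pre_ excludes exactly the inputs where some chakra's info dict lacks the "status" key, on which Python A raises KeyError.
def Pre_build_quick_reading (chakras : List (String × List (String × String))) : Prop :=
  ∀ p ∈ chakras, (List.lookup "status" p.2).isSome = true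
instance (chakras : List (String × List (String × String))) : Decidable (Pre_build_quick_reading chakras) := by unfold Pre_build_quick_reading; infer_instance

def pvWitness_build_quick_reading : (List (String × List (String × String))) :=
  [("Root", [("status", "Blocked / Underactive")]), ("Heart", [("status", "Balanced")])]

def Spec_build_quick_reading (chakras : List (String × List (String × String))) (out : String) : Prop := out = build_quick_reading_alt chakras
instance (chakras : List (String × List (String × String))) (out : String) : Decidable (Spec_build_quick_reading chakras out) := by unfold Spec_build_quick_reading; infer_instance

-- ===== CLAIM (what is proved, stated in full; the proofs are below) =====
def Claim_equal_build_quick_reading : Prop := ∀ (chakras : List (String × List (String × String))), Dom_build_quick_reading chakras → Pre_build_quick_reading chakras → Spec_build_quick_reading chakras (build_quick_reading chakras)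

-- ===== LEMMAS AND PROOFS =====

def pvNames (chakras : List (String × List (String × String))) (s : String) : List String :=
  (chakras.filter (fun p => pvStatus p.2 == s)).map Prod.fst

lemma pvClassify_go (chakras : List (String × List (String × String)))
    (acc : List String × List String × List String) :
    chakras.foldl (fun acc p =>
      let stt := pvStatus p.2
      if stt == "Blocked / Underactive" then (acc.1 ++ [p.1], acc.2.1, acc.2.2)
      else if stt == "Slightly Weak" then (acc.1, acc.2.1 ++ [p.1], acc.2.2)
      else if stt == "Overactive / Dominant" then (acc.1, acc.2.1, acc.2.2 ++ [p.1])
      else acc) acc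
    = (acc.1 ++ pvNames chakras "Blocked / Underactive",
       acc.2.1 ++ pvNames chakras "Slightly Weak",
       acc.2.2 ++ pvNames chakras "Overactive / Dominant") := by
  induction chakras generalizing acc with
  | nil => simp [pvNames]
  | cons hd tl ih =>
    rw [List.foldl_cons, ih]
    by_cases h1 : pvStatus hd.2 = "Blocked / Underactive"
    · simp [pvNames, h1]
    · by_cases h2 : pvStatus hd.2 = "Slightly Weak"
      · simp [pvNames, h2]
      · by_cases h3 : pvStatus hd.2 = "Overactive / Dominant"
        · simp [pvNames, h3]
        · simp [pvNames, h1, h2, h3]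

lemma pvClassify_eq (chakras : List (String × List (String × String))) :
    pvClassify chakras
    = (pvNames chakras "Blocked / Underactive",
       pvNames chakras "Slightly Weak",
       pvNames chakras "Overactive / Dominant") := by
  unfold pvClassify
  rw [pvClassify_go]
  simp

-- ===== VERDICT (by name: the statement is the Claim_ definition above) =====
theorem build_quick_reading_spec : Claim_equal_build_quick_reading := by
  intro chakras _ _
  unfold Spec_build_quick_reading build_quick_reading build_quick_reading_alt pvTable
  rw [pvClassify_eq]
  simp only [List.foldl_cons, List.foldl_nil]
  have e1 : (chakras.filter (fun p => pvStatus p.2 == "Blocked / Underactive")).map Prod.fst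
      = pvNames chakras "Blocked / Underactive" := rfl
  have e2 : (chakras.filter (fun p => pvStatus p.2 == "Slightly Weak")).map Prod.fst
      = pvNames chakras "Slightly Weak" := rfl
  have e3 : (chakras.filter (fun p => pvStatus p.2 == "Overactive / Dominant")).map Prod.fst
      = pvNames chakras "Overactive / Dominant" := rfl
  rw [e1, e2, e3]
  generalize pvNames chakras "Blocked / Underactive" = n1
  generalize pvNames chakras "Slightly Weak" = n2
  generalize pvNames chakras "Overactive / Dominant" = n3
  cases n1 <;> cases n2 <;> cases n3 <;> simp
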